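-- pv_equiv track=rewrite | github.com/pypi-data/pypi-mirror-141 | packages/sam2lca/sam2lca-0.3.2-py3-none-any.whl/sam2lca/utils.py | count_reads_taxid
-- ===== SOURCE A (Python) =====
-- def count_reads_taxid(read_taxid_dict):
--     """Returns number of reads matching TAXID
--
--     Args:
--         read_taxid_dict (dict): {read_name(str): TAXID(int)}
--     """
--     taxid_cnt = {}
--     taxid_reads = {}
--     for r in read_taxid_dict:
--         if read_taxid_dict[r] not in taxid_cnt:
--             taxid_cnt[read_taxid_dict[r]] = 1
--             taxid_reads[read_taxid_dict[r]] = [r]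
--             continue
--         else:
--             taxid_cnt[read_taxid_dict[r]] += 1
--             taxid_reads[read_taxid_dict[r]].append(r)
--     return taxid_cnt, taxid_reads
-- ===== SOURCE B (Python) =====
-- def count_reads_taxid(read_taxid_dict):
--     """Returns number of reads matching TAXID
--
--     Args:
--         read_taxid_dict (dict): {read_name(str): TAXID(int)}
--     """
--     items = list(read_taxid_dict.items())
--     taxids = []
--     for _, t in items:
--         if t not in taxids:
--             taxids.append(t)
--     values = [t for _, t in items]
--     taxid_cnt = {t: values.count(t) for t in taxids}
--     taxid_reads = {t: [r for r, v in items if v == t] for t in taxids}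
--     return taxid_cnt, taxid_reads
-- ===== Notes on version B (the rewrite author's own statement) =====
-- stated objective: alternative
-- what changed: A makes one pass maintaining two dicts incrementally; B never groups in a dict at all: it first collects the distinct taxids in first-appearance order, then answers each taxid by whole-list scans (values.count for the counts, a filter comprehension for the read lists).
import Mathlib
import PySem

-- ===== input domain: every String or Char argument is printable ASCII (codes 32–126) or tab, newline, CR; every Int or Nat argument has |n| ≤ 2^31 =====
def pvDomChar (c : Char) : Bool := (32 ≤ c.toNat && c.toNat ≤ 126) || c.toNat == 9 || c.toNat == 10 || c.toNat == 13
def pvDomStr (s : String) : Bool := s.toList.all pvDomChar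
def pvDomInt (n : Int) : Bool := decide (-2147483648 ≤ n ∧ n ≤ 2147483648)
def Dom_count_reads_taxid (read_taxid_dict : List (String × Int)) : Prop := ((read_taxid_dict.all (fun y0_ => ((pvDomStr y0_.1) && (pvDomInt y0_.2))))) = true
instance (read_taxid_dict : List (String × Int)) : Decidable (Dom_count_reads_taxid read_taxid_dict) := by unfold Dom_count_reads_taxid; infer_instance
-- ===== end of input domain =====

-- B replaces A's single-pass dict grouping by a staged computation: the distinct
-- taxids in first-appearance order, then per-taxid whole-list scans (count / filter).
-- Objective: alternative decomposition (no grouping dict maintained); not faster.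


-- ===== PORT A =====
-- 'for r in read_taxid_dict' with lookups 'read_taxid_dict[r]' iterates the dict's
-- key/value pairs in insertion order, i.e. the items of the dict built from the list.
def count_reads_taxid (read_taxid_dict : List (String × Int)) : (List (Int × Int)) × (List (Int × List String)) :=
  let d := PySem.Dict.ofList read_taxid_dict
  let st := d.items.foldl
    (fun (st : PySem.Dict Int Int × PySem.Dict Int (List String)) p =>
      if st.1.contains p.2 = false then
        (st.1.insert p.2 1, st.2.insert p.2 [p.1])
      else
        (st.1.modify p.2 0 (· + 1), st.2.modify p.2 [] (· ++ [p.1])))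
    (PySem.Dict.empty, PySem.Dict.empty)
  (st.1.items, st.2.items)

-- ===== PORT B =====
def count_reads_taxid_alt (read_taxid_dict : List (String × Int)) : (List (Int × Int)) × (List (Int × List String)) :=
  let items := (PySem.Dict.ofList read_taxid_dict).items
  -- 'if t not in taxids: taxids.append(t)'
  let taxids := items.foldl (fun (s : List Int) p => if p.2 ∈ s then s else s ++ [p.2]) []
  let values := items.map (·.2)
  (taxids.map (fun t => (t, (values.count t : Int))),
   taxids.map (fun t => (t, (items.filter (fun p => p.2 == t)).map (·.1))))

-- ===== PRECONDITION & SPEC =====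
def Spec_count_reads_taxid (read_taxid_dict : List (String × Int)) (out : (List (Int × Int)) × (List (Int × List String))) : Prop := out = count_reads_taxid_alt read_taxid_dict
instance (read_taxid_dict : List (String × Int)) (out : (List (Int × Int)) × (List (Int × List String))) : Decidable (Spec_count_reads_taxid read_taxid_dict out) := by unfold Spec_count_reads_taxid; infer_instance

-- ===== CLAIM (what is proved, stated in full; the proofs are below) =====
def Claim_equal_count_reads_taxid : Prop := ∀ (read_taxid_dict : List (String × Int)), Dom_count_reads_taxid read_taxid_dict → Spec_count_reads_taxid read_taxid_dict (count_reads_taxid read_taxid_dict)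

-- ===== LEMMAS AND PROOFS =====

-- The single grouping fold (what A's second dict does step by step).
def crtFoldG (l : List (String × Int)) (d : PySem.Dict Int (List String)) : PySem.Dict Int (List String) :=
  l.foldl (fun g p => g.modify p.2 [] (· ++ [p.1])) d

-- A's loop state vs the grouping fold: A's count dict is always the length image of
-- the grouping dict, and A's grouping dict is the plain modify-fold.
theorem crt_invariant (l : List (String × Int))
    (cnt : PySem.Dict Int Int) (reads : PySem.Dict Int (List String))
    (hn : reads.keys.Nodup)
    (h : cnt.items = reads.items.map (fun q => (q.1, (q.2.length : Int)))) :
    (l.foldl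
      (fun (st : PySem.Dict Int Int × PySem.Dict Int (List String)) p =>
        if st.1.contains p.2 = false then
          (st.1.insert p.2 1, st.2.insert p.2 [p.1])
        else
          (st.1.modify p.2 0 (· + 1), st.2.modify p.2 [] (· ++ [p.1])))
      (cnt, reads)).1.items
      = (crtFoldG l reads).items.map (fun q => (q.1, (q.2.length : Int)))
    ∧ (l.foldl
      (fun (st : PySem.Dict Int Int × PySem.Dict Int (List String)) p =>
        if st.1.contains p.2 = false then
          (st.1.insert p.2 1, st.2.insert p.2 [p.1])
        else
          (st.1.modify p.2 0 (· + 1), st.2.modify p.2 [] (· ++ [p.1])))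
      (cnt, reads)).2
      = crtFoldG l reads := by
  induction l generalizing cnt reads with
  | nil => exact ⟨h, rfl⟩
  | cons p l ih =>
    obtain ⟨r, t⟩ := p
    have hkeys : cnt.keys = reads.keys := by
      show cnt.items.map (·.1) = reads.items.map (·.1)
      rw [h, List.map_map]; rfl
    have hcont : cnt.contains t = reads.contains t := by
      rw [PySem.Dict.contains_eq_decide_mem_keys, PySem.Dict.contains_eq_decide_mem_keys, hkeys]
    simp only [List.foldl_cons, crtFoldG] at *
    by_cases hc : reads.contains t = true
    · rw [if_neg (by simp [hcont, hc])]
      obtain ⟨v, hv⟩ : ∃ v, reads.get? t = some v := by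
        have := PySem.Dict.contains_eq_isSome_get? reads t
        rw [hc] at this
        exact Option.isSome_iff_exists.mp this.symm
      have hgd : reads.getD t [] = v := PySem.Dict.getD_of_get?_eq_some reads [] hv
      have hmemr : (t, v) ∈ reads.items := PySem.Dict.mem_items_of_get?_eq_some reads hv
      have hmemc : (t, (v.length : Int)) ∈ cnt.items := by
        rw [h]; exact List.mem_map.mpr ⟨(t, v), hmemr, rfl⟩
      have hnc : cnt.keys.Nodup := by rw [hkeys]; exact hn
      have hcg : cnt.getD t 0 = (v.length : Int) :=
        PySem.Dict.getD_of_mem_items cnt hmemc hnc 0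
      have hcontc : cnt.contains t = true := by rw [hcont, hc]
      apply ih
      · show (reads.insert t (reads.getD t [] ++ [r])).keys.Nodup
        rwa [PySem.Dict.keys_insert_of_contains _ _ hc]
      · show (cnt.insert t (cnt.getD t 0 + 1)).items
            = (reads.insert t (reads.getD t [] ++ [r])).items.map (fun q => (q.1, (q.2.length : Int)))
        rw [PySem.Dict.items_insert_of_contains _ _ hcontc,
            PySem.Dict.items_insert_of_contains _ _ hc, h,
            List.map_map, List.map_map]
        refine List.map_congr_left (fun q _ => ?_)
        by_cases hq : q.1 = t
        · simp [hq, hgd, hcg]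
        · simp [hq]
    · have hc' : reads.contains t = false := by simpa using hc
      rw [if_pos (by simp [hcont, hc'])]
      have hmod : reads.modify t [] (· ++ [r]) = reads.insert t [r] := by
        show reads.insert t (reads.getD t [] ++ [r]) = reads.insert t [r]
        rw [PySem.Dict.getD_of_not_contains reads [] hc']; rfl
      rw [hmod]
      apply ih
      · rw [PySem.Dict.keys_insert_of_not_contains _ _ hc']
        have ht : t ∉ reads.keys := by
          intro hm
          have : reads.contains t = true := by
            rw [PySem.Dict.contains_eq_decide_mem_keys]; simpa using hm
          rw [this] at hc'; exact absurd hc' (by simp)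
        exact List.nodup_append.mpr ⟨hn, List.nodup_singleton t, fun a ha b hb => by rw [List.mem_singleton.mp hb]; exact fun h => ht (h ▸ ha)⟩
      · rw [PySem.Dict.items_insert_of_not_contains _ _ (by rw [hcont]; exact hc'),
            PySem.Dict.items_insert_of_not_contains _ _ hc', h, List.map_append]
        rfl

-- B's dedup loop is set(values) in first-appearance order.
theorem crt_taxids_eq (items : List (String × Int)) :
    items.foldl (fun (s : List Int) p => if p.2 ∈ s then s else s ++ [p.2]) []
      = PySem.Set.ofList (items.map (·.2)) := by
  simp only [← PySem.Set.add_eq_ite]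
  rw [← PySem.Set.update_map_eq_foldl_add, PySem.Set.update_nil_left]

theorem crt_keysG (items : List (String × Int)) :
    (crtFoldG items PySem.Dict.empty).keys = PySem.Set.ofList (items.map (·.2)) := by
  unfold crtFoldG
  rw [PySem.Dict.keys_foldl_modify_key]
  simp [PySem.Set.update_nil_left]

theorem crt_getDG (items : List (String × Int)) (t : Int) :
    (crtFoldG items PySem.Dict.empty).getD t []
      = (items.filter (fun p => p.2 == t)).map (·.1) := by
  unfold crtFoldG
  rw [show (items.foldl (fun (g : PySem.Dict Int (List String)) p => g.modify p.2 [] (· ++ [p.1])) PySem.Dict.empty)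
        = ((items.map (fun p => (p.2, p.1))).foldl (fun g q => g.modify q.1 [] (· ++ [q.2])) PySem.Dict.empty)
      by rw [List.foldl_map],
    PySem.Dict.getD_foldl_modify_append, PySem.Dict.getD_empty]
  simp [List.filter_map, Function.comp_def]

theorem crt_itemsG (items : List (String × Int)) :
    (crtFoldG items PySem.Dict.empty).items
      = (PySem.Set.ofList (items.map (·.2))).map
          (fun t => (t, (items.filter (fun p => p.2 == t)).map (·.1))) := by
  have hn : (crtFoldG items PySem.Dict.empty).keys.Nodup := by
    rw [crt_keysG]; exact PySem.Set.nodup_ofList _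
  rw [PySem.Dict.items_eq_map_keys _ hn [], crt_keysG]
  exact List.map_congr_left (fun t _ => by rw [crt_getDG])

theorem crt_count_eq (items : List (String × Int)) (t : Int) :
    (items.map (·.2)).count t = (items.filter (fun p => p.2 == t)).length := by
  simp [List.count_eq_countP, List.countP_eq_length_filter, List.filter_map, Function.comp_def]

-- ===== VERDICT (by name: the statement is the Claim_ definition above) =====
theorem count_reads_taxid_spec : Claim_equal_count_reads_taxid := by
  intro l _
  show count_reads_taxid l = count_reads_taxid_alt l
  simp only [count_reads_taxid, count_reads_taxid_alt]
  have h := crt_invariant (PySem.Dict.ofList l).items PySem.Dict.empty PySem.Dict.empty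
    PySem.Dict.nodup_keys_empty rfl
  rw [crt_taxids_eq, h.1, h.2, crt_itemsG, List.map_map]
  refine Prod.ext (List.map_congr_left fun t _ => ?_) rfl
  simp [crt_count_eq]
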